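-- pv_equiv track=rewrite | github.com/EPFL-IC-Make-Team/medinote | utils/eval.py | get_counts_and_clean_dict
-- ===== SOURCE A (Python) =====
-- NO_SUCH_KEY = "no_such_key"
--
-- NONE_FIELD = "None"
--
-- COUNTS_TYPES = ['missing_keys_count', 'extra_keys_count', 'common_none_count',  'gold_none_count', 'pred_none_count', 'common', 'total']
--
-- KEY_MISMATCH_TYPE = ['gold_none_keys', 'pred_none_keys', 'missing_keys']
--
-- def get_counts_and_clean_dict(flattened_dict):
--     '''
--     Given a flattened dictionary, compute the number of missing keys, extra keys,
--     common keys with None value, common keys with None value in gold, common keys with None value in pred.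
--     also returns remaining common keys (with no nones) amd missing ones for further evaluation.
--     Outputs:
--         - counts (dict of str: int): dictionaries of counts mentionned above
--         - clean_flat_dict (dict of str: (str, str)): flattened dictionary of
--                                     matched (gold, pred) values that had no None values
--         - key_mismatches (dict of str: list of str): dictionary of lists of mismatched keys
--                                     (either missing keys, or with unexpected None values)
--     '''
--
--     counts = {key: 0 for key in COUNTS_TYPES}
--     counts['total']= len(flattened_dict)
--     clean_flat_dict = {}
--     key_mismatches = {key : [] for key in KEY_MISMATCH_TYPE}
--     for key, (gold, pred) in flattened_dict.items():
--         if gold == NO_SUCH_KEY: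
--             counts['extra_keys_count'] += 1
--         if pred == NO_SUCH_KEY:
--             key_mismatches['missing_keys'].append(key)
--         if gold == NONE_FIELD:
--             if pred == NONE_FIELD:
--                 counts['common_none_count'] += 1
--             else:
--                 key_mismatches['gold_none_keys'].append(key)
--         else:
--             if pred == NONE_FIELD:
--                 key_mismatches['pred_none_keys'].append(key)
--             else:
--                 counts['common'] += 1
--                 clean_flat_dict[key] = (gold, pred)
--     counts['gold_none_count'] = len(key_mismatches['gold_none_keys'])
--     counts['pred_none_count'] = len(key_mismatches['pred_none_keys'])
--     counts['missing_keys_count'] = len(key_mismatches['missing_keys'])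
--     return counts, clean_flat_dict, key_mismatches
-- ===== SOURCE B (Python) =====
-- NO_SUCH_KEY = "no_such_key"
-- NONE_FIELD = "None"
--
-- def get_counts_and_clean_dict(flattened_dict):
--     items = flattened_dict.items()
--     clean_flat_dict = {k: (g, p) for k, (g, p) in items
--                        if g != NONE_FIELD and p != NONE_FIELD}
--     gold_none_keys = [k for k, (g, p) in items if g == NONE_FIELD and p != NONE_FIELD]
--     pred_none_keys = [k for k, (g, p) in items if g != NONE_FIELD and p == NONE_FIELD]
--     missing_keys = [k for k, (g, p) in items if p == NO_SUCH_KEY]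
--     counts = {
--         'missing_keys_count': len(missing_keys),
--         'extra_keys_count': sum(1 for _, (g, _p) in items if g == NO_SUCH_KEY),
--         'common_none_count': sum(1 for _, (g, p) in items if g == NONE_FIELD and p == NONE_FIELD),
--         'gold_none_count': len(gold_none_keys),
--         'pred_none_count': len(pred_none_keys),
--         'common': len(clean_flat_dict),
--         'total': len(flattened_dict),
--     }
--     key_mismatches = {'gold_none_keys': gold_none_keys,
--                       'pred_none_keys': pred_none_keys,
--                       'missing_keys': missing_keys}
--     return counts, clean_flat_dict, key_mismatches
-- ===== Notes on version B (the rewrite author's own statement) =====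
-- stated objective: simpler
-- what changed: Replaces the single stateful loop that mutates three dicts with independent comprehensions/filtered passes per output category, assembling the counts and mismatch dicts once at the end.
import Mathlib
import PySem

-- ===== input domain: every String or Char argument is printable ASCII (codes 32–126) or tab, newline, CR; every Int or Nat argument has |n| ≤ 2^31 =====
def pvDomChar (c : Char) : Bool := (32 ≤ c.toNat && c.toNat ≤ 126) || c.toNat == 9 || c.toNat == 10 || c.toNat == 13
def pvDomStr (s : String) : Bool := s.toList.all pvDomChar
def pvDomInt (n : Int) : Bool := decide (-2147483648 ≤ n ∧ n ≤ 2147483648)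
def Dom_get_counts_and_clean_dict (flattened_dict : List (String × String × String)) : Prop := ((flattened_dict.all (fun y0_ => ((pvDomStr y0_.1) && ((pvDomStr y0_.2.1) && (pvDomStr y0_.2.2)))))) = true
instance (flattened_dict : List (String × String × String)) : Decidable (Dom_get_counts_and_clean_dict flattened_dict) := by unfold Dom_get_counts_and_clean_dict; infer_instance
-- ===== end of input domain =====

-- B replaces A's single stateful loop (mutating three dicts) by independent filtered
-- passes per output category, assembling the three result dicts at the end (objective: simpler).


-- ===== PORT A =====
-- one iteration of A's loop over the state (counts, clean_flat_dict, key_mismatches)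
def pvStepA (st : PySem.Dict String Int × PySem.Dict String (String × String) × PySem.Dict String (List String))
    (e : String × String × String) :
    PySem.Dict String Int × PySem.Dict String (String × String) × PySem.Dict String (List String) :=
  let counts := if e.2.1 = "no_such_key" then st.1.modify "extra_keys_count" 0 (· + 1) else st.1
  let mism := if e.2.2 = "no_such_key" then st.2.2.modify "missing_keys" [] (· ++ [e.1]) else st.2.2
  if e.2.1 = "None" then
    if e.2.2 = "None" then (counts.modify "common_none_count" 0 (· + 1), st.2.1, mism)
    else (counts, st.2.1, mism.modify "gold_none_keys" [] (· ++ [e.1]))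
  else
    if e.2.2 = "None" then (counts, st.2.1, mism.modify "pred_none_keys" [] (· ++ [e.1]))
    else (counts.modify "common" 0 (· + 1), st.2.1.insert e.1 e.2, mism)

def get_counts_and_clean_dict (flattened_dict : List (String × String × String)) :
    (List (String × Int)) × (List (String × String × String)) × (List (String × List String)) :=
  let counts0 : PySem.Dict String Int := PySem.Dict.mk
    [("missing_keys_count", 0), ("extra_keys_count", 0), ("common_none_count", 0),
     ("gold_none_count", 0), ("pred_none_count", 0), ("common", 0), ("total", 0)]
  let counts0 := counts0.insert "total" (flattened_dict.length : Int)
  let clean0 : PySem.Dict String (String × String) := PySem.Dict.mk []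
  let mism0 : PySem.Dict String (List String) := PySem.Dict.mk
    [("gold_none_keys", []), ("pred_none_keys", []), ("missing_keys", [])]
  let st := flattened_dict.foldl pvStepA (counts0, clean0, mism0)
  let counts := st.1.insert "gold_none_count" ((st.2.2.getD "gold_none_keys" []).length : Int)
  let counts := counts.insert "pred_none_count" ((st.2.2.getD "pred_none_keys" []).length : Int)
  let counts := counts.insert "missing_keys_count" ((st.2.2.getD "missing_keys" []).length : Int)
  (counts.items, st.2.1.items, st.2.2.items)

-- ===== PORT B =====
def get_counts_and_clean_dict_alt (flattened_dict : List (String × String × String)) :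
    (List (String × Int)) × (List (String × String × String)) × (List (String × List String)) :=
  let clean : PySem.Dict String (String × String) :=
    PySem.Dict.ofList (flattened_dict.filter (fun e => e.2.1 ≠ "None" ∧ e.2.2 ≠ "None"))
  let gold_none_keys := (flattened_dict.filter (fun e => e.2.1 = "None" ∧ e.2.2 ≠ "None")).map (·.1)
  let pred_none_keys := (flattened_dict.filter (fun e => e.2.1 ≠ "None" ∧ e.2.2 = "None")).map (·.1)
  let missing_keys := (flattened_dict.filter (fun e => e.2.2 = "no_such_key")).map (·.1)
  let counts : List (String × Int) :=
    [("missing_keys_count", (missing_keys.length : Int)),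
     ("extra_keys_count", (flattened_dict.countP (fun e => e.2.1 = "no_such_key") : Int)),
     ("common_none_count", (flattened_dict.countP (fun e => e.2.1 = "None" ∧ e.2.2 = "None") : Int)),
     ("gold_none_count", (gold_none_keys.length : Int)),
     ("pred_none_count", (pred_none_keys.length : Int)),
     ("common", (clean.size : Int)),
     ("total", (flattened_dict.length : Int))]
  (counts, clean.items,
   [("gold_none_keys", gold_none_keys), ("pred_none_keys", pred_none_keys),
    ("missing_keys", missing_keys)])

-- ===== PRECONDITION & SPEC =====
-- Pre_: the argument is a Python dict, so its keys are pairwise distinct; association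
-- lists with duplicate keys do not arise from any Python call.
def Pre_get_counts_and_clean_dict (flattened_dict : List (String × String × String)) : Prop :=
  (flattened_dict.map Prod.fst).Nodup
instance (flattened_dict : List (String × String × String)) : Decidable (Pre_get_counts_and_clean_dict flattened_dict) := by unfold Pre_get_counts_and_clean_dict; infer_instance

def pvWitness_get_counts_and_clean_dict : (List (String × String × String)) :=
  [("a", "None", "None"), ("b", "g1", "no_such_key"), ("c", "None", "p1"),
   ("d", "g2", "None"), ("e", "no_such_key", "p2")]

def Spec_get_counts_and_clean_dict (flattened_dict : List (String × String × String)) (out : (List (String × Int)) × (List (String × String × String)) × (List (String × List String))) : Prop := out = get_counts_and_clean_dict_alt flattened_dict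
instance (flattened_dict : List (String × String × String)) (out : (List (String × Int)) × (List (String × String × String)) × (List (String × List String))) : Decidable (Spec_get_counts_and_clean_dict flattened_dict out) := by unfold Spec_get_counts_and_clean_dict; infer_instance

-- ===== CLAIM (what is proved, stated in full; the proofs are below) =====
def Claim_equal_get_counts_and_clean_dict : Prop := ∀ (flattened_dict : List (String × String × String)), Dom_get_counts_and_clean_dict flattened_dict → Pre_get_counts_and_clean_dict flattened_dict → Spec_get_counts_and_clean_dict flattened_dict (get_counts_and_clean_dict flattened_dict)

-- ===== LEMMAS AND PROOFS =====

-- inserting a fresh key into a literal dict appends the pair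
theorem pvInsert_fresh {ν : Type} (cls : List (String × ν)) (k : String) (v : ν)
    (h : k ∉ cls.map Prod.fst) :
    (PySem.Dict.mk cls).insert k v = PySem.Dict.mk (cls ++ [(k, v)]) := by
  have hc : (PySem.Dict.mk cls).contains k = false := by
    rw [PySem.Dict.contains_eq_decide_mem_keys]
    simpa [PySem.Dict.keys] using h
  apply PySem.Dict.ext
  rw [PySem.Dict.items_insert_of_not_contains (h := hc)]

-- rfl-reductions of A's dict updates on the literal key shapes it maintains
theorem pvRedE (c1 c2 c3 c4 c5 c6 c7 : Int) :
    (PySem.Dict.mk [("missing_keys_count", c1), ("extra_keys_count", c2),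
      ("common_none_count", c3), ("gold_none_count", c4), ("pred_none_count", c5),
      ("common", c6), ("total", c7)]).modify "extra_keys_count" 0 (· + 1)
    = PySem.Dict.mk [("missing_keys_count", c1), ("extra_keys_count", c2 + 1),
      ("common_none_count", c3), ("gold_none_count", c4), ("pred_none_count", c5),
      ("common", c6), ("total", c7)] := rfl

theorem pvRedCN (c1 c2 c3 c4 c5 c6 c7 : Int) :
    (PySem.Dict.mk [("missing_keys_count", c1), ("extra_keys_count", c2),
      ("common_none_count", c3), ("gold_none_count", c4), ("pred_none_count", c5),
      ("common", c6), ("total", c7)]).modify "common_none_count" 0 (· + 1)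
    = PySem.Dict.mk [("missing_keys_count", c1), ("extra_keys_count", c2),
      ("common_none_count", c3 + 1), ("gold_none_count", c4), ("pred_none_count", c5),
      ("common", c6), ("total", c7)] := rfl

theorem pvRedC (c1 c2 c3 c4 c5 c6 c7 : Int) :
    (PySem.Dict.mk [("missing_keys_count", c1), ("extra_keys_count", c2),
      ("common_none_count", c3), ("gold_none_count", c4), ("pred_none_count", c5),
      ("common", c6), ("total", c7)]).modify "common" 0 (· + 1)
    = PySem.Dict.mk [("missing_keys_count", c1), ("extra_keys_count", c2),
      ("common_none_count", c3), ("gold_none_count", c4), ("pred_none_count", c5),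
      ("common", c6 + 1), ("total", c7)] := rfl

theorem pvRedG (gk pk mk : List String) (x : String) :
    (PySem.Dict.mk [("gold_none_keys", gk), ("pred_none_keys", pk),
      ("missing_keys", mk)]).modify "gold_none_keys" [] (· ++ [x])
    = PySem.Dict.mk [("gold_none_keys", gk ++ [x]), ("pred_none_keys", pk),
      ("missing_keys", mk)] := rfl

theorem pvRedP (gk pk mk : List String) (x : String) :
    (PySem.Dict.mk [("gold_none_keys", gk), ("pred_none_keys", pk),
      ("missing_keys", mk)]).modify "pred_none_keys" [] (· ++ [x])
    = PySem.Dict.mk [("gold_none_keys", gk), ("pred_none_keys", pk ++ [x]),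
      ("missing_keys", mk)] := rfl

theorem pvRedM (gk pk mk : List String) (x : String) :
    (PySem.Dict.mk [("gold_none_keys", gk), ("pred_none_keys", pk),
      ("missing_keys", mk)]).modify "missing_keys" [] (· ++ [x])
    = PySem.Dict.mk [("gold_none_keys", gk), ("pred_none_keys", pk),
      ("missing_keys", mk ++ [x])] := rfl

-- the invariant of A's loop: folding pvStepA over l from a state whose three dicts have
-- the literal key shapes A sets up adds, per category, the filtered items of l
theorem pvLoopA (l : List (String × String × String))
    (c1 c2 c3 c4 c5 c6 c7 : Int) (cls : List (String × String × String))
    (gk pk mk : List String)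
    (h : (cls.map Prod.fst ++ l.map Prod.fst).Nodup) :
    l.foldl pvStepA
      (PySem.Dict.mk [("missing_keys_count", c1), ("extra_keys_count", c2),
        ("common_none_count", c3), ("gold_none_count", c4), ("pred_none_count", c5),
        ("common", c6), ("total", c7)],
       PySem.Dict.mk cls,
       PySem.Dict.mk [("gold_none_keys", gk), ("pred_none_keys", pk), ("missing_keys", mk)])
    = (PySem.Dict.mk [("missing_keys_count", c1),
        ("extra_keys_count", c2 + (l.countP (fun e => e.2.1 = "no_such_key") : Int)),
        ("common_none_count", c3 + (l.countP (fun e => e.2.1 = "None" ∧ e.2.2 = "None") : Int)),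
        ("gold_none_count", c4), ("pred_none_count", c5),
        ("common", c6 + (l.countP (fun e => e.2.1 ≠ "None" ∧ e.2.2 ≠ "None") : Int)),
        ("total", c7)],
       PySem.Dict.mk (cls ++ l.filter (fun e => e.2.1 ≠ "None" ∧ e.2.2 ≠ "None")),
       PySem.Dict.mk
        [("gold_none_keys", gk ++ (l.filter (fun e => e.2.1 = "None" ∧ e.2.2 ≠ "None")).map (·.1)),
         ("pred_none_keys", pk ++ (l.filter (fun e => e.2.1 ≠ "None" ∧ e.2.2 = "None")).map (·.1)),
         ("missing_keys", mk ++ (l.filter (fun e => e.2.2 = "no_such_key")).map (·.1))]) := by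
  induction l generalizing c1 c2 c3 c4 c5 c6 c7 cls gk pk mk with
  | nil => simp
  | cons e l ih =>
    obtain ⟨k, g, p⟩ := e
    rw [List.foldl_cons]
    have hk : k ∉ cls.map Prod.fst := by
      intro hm
      exact (List.nodup_append.mp h).2.2 k hm k (by simp) rfl
    have hins : (PySem.Dict.mk cls).insert k (g, p) = PySem.Dict.mk (cls ++ [(k, (g, p))]) :=
      pvInsert_fresh cls k (g, p) hk
    have h' : ((cls ++ [(k, (g, p))]).map Prod.fst ++ l.map Prod.fst).Nodup := by
      simpa [List.map_append, List.append_assoc] using h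
    have h'' : (cls.map Prod.fst ++ l.map Prod.fst).Nodup :=
      h.sublist ((List.sublist_cons_self k (l.map Prod.fst)).append_left (cls.map Prod.fst))
    by_cases hg : g = "None" <;> by_cases hp : p = "None" <;>
      by_cases hgn : g = "no_such_key" <;> by_cases hpn : p = "no_such_key"
    all_goals try (exact absurd (hg ▸ hgn : ("None" : String) = "no_such_key") (by decide))
    all_goals try (exact absurd (hp ▸ hpn : ("None" : String) = "no_such_key") (by decide))
    all_goals
      simp [pvStepA, hg, hp, hgn, hpn, pvRedE, pvRedCN, pvRedC, pvRedG, pvRedP, pvRedM, hins]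
    all_goals try simp only [hg, hp, hgn, hpn] at hins h'
    all_goals try rw [hins]
    all_goals try rw [ih _ _ _ _ _ _ _ _ _ _ _ h']
    all_goals try rw [ih _ _ _ _ _ _ _ _ _ _ _ h'']
    all_goals try simp
    all_goals try omega

theorem pvOfList_items {ν : Type} (xs : List (String × ν)) (h : (xs.map Prod.fst).Nodup) :
    (PySem.Dict.ofList xs).items = xs := by
  have : PySem.Dict.ofList xs
      = xs.foldl (fun d p => d.insert p.1 p.2) (PySem.Dict.mk []) := rfl
  rw [this]
  have := PySem.Dict.items_foldl_insert_fresh (l := xs) (d := PySem.Dict.mk [])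
    (k := Prod.fst) (v := Prod.snd) (by intro a _; rfl) h
  simpa using this

-- ===== VERDICT (by name: the statement is the Claim_ definition above) =====
theorem get_counts_and_clean_dict_spec : Claim_equal_get_counts_and_clean_dict := by
  intro l _ hpre
  unfold Spec_get_counts_and_clean_dict get_counts_and_clean_dict get_counts_and_clean_dict_alt
  have h : (([] : List (String × String × String)).map Prod.fst ++ l.map Prod.fst).Nodup := by
    simpa using hpre
  have hclean : (PySem.Dict.ofList
      (l.filter (fun e => !decide (e.2.1 = "None") && !decide (e.2.2 = "None")))).items
      = l.filter (fun e => !decide (e.2.1 = "None") && !decide (e.2.2 = "None")) :=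
    pvOfList_items _ (hpre.sublist ((l.filter_sublist).map Prod.fst))
  simp only []
  rw [show (PySem.Dict.mk
      [("missing_keys_count", (0:Int)), ("extra_keys_count", 0), ("common_none_count", 0),
       ("gold_none_count", 0), ("pred_none_count", 0), ("common", 0), ("total", 0)]).insert
       "total" (l.length : Int)
     = PySem.Dict.mk
      [("missing_keys_count", (0:Int)), ("extra_keys_count", 0), ("common_none_count", 0),
       ("gold_none_count", 0), ("pred_none_count", 0), ("common", 0), ("total", (l.length : Int))]
     from rfl]
  rw [pvLoopA l 0 0 0 0 0 0 (l.length : Int) [] [] [] [] h]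
  simp [hclean, PySem.Dict.size, PySem.Dict.getD, PySem.Dict.get?, PySem.Dict.insert, List.countP_eq_length_filter]
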